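-- pv_equiv track=rewrite | github.com/Haisei-Cho/trend-monitor | function/news_collector/news_collector_function.py | filter_by_exclusion
-- ===== SOURCE A (Python) =====
-- def filter_by_exclusion(articles: list[dict], exc_kw: list[str]) -> list[dict]:
--     """除外キーワードに基づいて記事をフィルタリングする。"""
--     if not exc_kw:
--         return articles
--
--     filtered = []
--     for article in articles:
--         text = article.get("title", "") + " " + article.get("description", "")
--         if any(kw in text for kw in exc_kw):
--             continue
--         filtered.append(article)
--     return filtered
-- ===== SOURCE B (Python) =====
-- def filter_by_exclusion(articles: list[dict], exc_kw: list[str]) -> list[dict]: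
--     """Position-major scan: walk the text once and test each keyword as a prefix
--     of each suffix, instead of one full substring search per keyword."""
--     if not exc_kw:
--         return articles
--
--     def hit(text: str) -> bool:
--         for i in range(len(text) + 1):
--             tail = text[i:]
--             for kw in exc_kw:
--                 if tail.startswith(kw):
--                     return True
--         return False
--
--     return [a for a in articles
--             if not hit(a.get("title", "") + " " + a.get("description", ""))]
-- ===== Notes on version B (the rewrite author's own statement) =====
-- stated objective: alternative
-- what changed: Keyword-major substring search ('kw in text' per keyword) is replaced by a position-major scan: one left-to-right pass over the text testing every keyword as a prefix of each suffix, and the accumulator loop is replaced by a comprehension/filter.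
import Mathlib
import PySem

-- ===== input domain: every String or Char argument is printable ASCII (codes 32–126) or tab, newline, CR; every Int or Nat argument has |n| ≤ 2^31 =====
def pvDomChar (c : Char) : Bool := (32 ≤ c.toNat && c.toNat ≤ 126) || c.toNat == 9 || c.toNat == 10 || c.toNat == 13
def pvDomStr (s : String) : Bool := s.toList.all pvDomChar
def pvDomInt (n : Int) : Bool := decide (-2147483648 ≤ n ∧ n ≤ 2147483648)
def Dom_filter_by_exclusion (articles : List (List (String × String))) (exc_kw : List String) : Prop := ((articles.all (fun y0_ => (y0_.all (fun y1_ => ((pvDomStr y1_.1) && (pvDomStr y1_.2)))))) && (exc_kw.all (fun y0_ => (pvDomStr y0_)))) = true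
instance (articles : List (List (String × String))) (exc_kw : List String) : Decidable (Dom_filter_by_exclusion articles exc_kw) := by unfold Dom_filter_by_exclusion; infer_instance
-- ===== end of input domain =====

-- B replaces the keyword-major substring search (kw in text, per keyword) by a position-major
-- scan (each suffix of the text tested against every keyword as a prefix) — objective: alternative.

-- ===== PORT A =====
def filter_by_exclusion (articles : List (List (String × String))) (exc_kw : List String) : List (List (String × String)) :=
  if exc_kw = [] then articles
  else
    articles.foldl (fun filtered article =>
      let text := PySem.Dict.getD (PySem.Dict.mk article) "title" "" ++ " "
                    ++ PySem.Dict.getD (PySem.Dict.mk article) "description" ""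
      if exc_kw.any (fun kw => PySem.Str.isIn kw text) then filtered
      else filtered ++ [article]) []

-- ===== PORT B =====
-- helper 'hit' of Source B: the position-major scan with early return (List.any)
def pvHit (exc_kw : List String) (text : String) : Bool :=
  (PySem.List.pyRange 0 (PySem.Str.len text + 1) 1).any (fun i =>
    exc_kw.any (fun kw => PySem.Str.startswith (PySem.Str.slice text (some i) none) kw))

def filter_by_exclusion_alt (articles : List (List (String × String))) (exc_kw : List String) : List (List (String × String)) :=
  if exc_kw = [] then articles
  else
    articles.filter (fun a =>
      !pvHit exc_kw (PySem.Dict.getD (PySem.Dict.mk a) "title" "" ++ " "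
                      ++ PySem.Dict.getD (PySem.Dict.mk a) "description" ""))

-- ===== PRECONDITION & SPEC =====
def Spec_filter_by_exclusion (articles : List (List (String × String))) (exc_kw : List String) (out : List (List (String × String))) : Prop := out = filter_by_exclusion_alt articles exc_kw
instance (articles : List (List (String × String))) (exc_kw : List String) (out : List (List (String × String))) : Decidable (Spec_filter_by_exclusion articles exc_kw out) := by unfold Spec_filter_by_exclusion; infer_instance

-- ===== CLAIM (what is proved, stated in full; the proofs are below) =====
def Claim_equal_filter_by_exclusion : Prop := ∀ (articles : List (List (String × String))) (exc_kw : List String), Dom_filter_by_exclusion articles exc_kw → Spec_filter_by_exclusion articles exc_kw (filter_by_exclusion articles exc_kw)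

-- ===== LEMMAS AND PROOFS =====

-- the position-major scan finds a keyword iff some keyword is a substring
lemma pvHit_eq (kws : List String) (text : String) :
    pvHit kws text = kws.any (fun kw => PySem.Str.isIn kw text) := by
  apply Bool.eq_iff_iff.mpr
  simp only [pvHit, List.any_eq_true, PySem.Str.startswith_eq, PySem.Str.isIn_eq,
    PySem.Str.toList_slice, PySem.Chars.slice_eq_listSlice, PySem.Chars.startswith_iff,
    PySem.List.mem_pyRange_one]
  constructor
  · rintro ⟨i, ⟨h0, _⟩, kw, hkw, hpre⟩
    refine ⟨kw, hkw, ?_⟩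
    rw [← PySem.Chars.exists_prefix_drop_iff_isIn]
    exact ⟨i.toNat, by simp only [PySem.List.slice_from _ h0] at hpre; exact hpre⟩
  · rintro ⟨kw, hkw, hin⟩
    rw [← PySem.Chars.exists_prefix_drop_iff_isIn] at hin
    obtain ⟨j, hj⟩ := hin
    set n := text.toList.length with hn
    refine ⟨(min j n : Nat), ⟨Int.natCast_nonneg _, ?_⟩, kw, hkw, ?_⟩
    · have : (min j n : Int) ≤ n := by exact_mod_cast Nat.min_le_right j n
      simp only [PySem.Str.len_eq]
      omega
    · rw [PySem.List.slice_from _ (Int.natCast_nonneg _), Int.toNat_natCast]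
      rcases Nat.lt_or_ge n j with h | h
      · have : text.toList.drop j = [] := List.drop_eq_nil_of_le (le_of_lt h)
        rw [this] at hj
        rw [List.prefix_nil] at hj
        simp [hj]
      · rwa [Nat.min_eq_left h]

lemma foldl_skip_filter (p : List (String × String) → Bool) (l : List (List (String × String))) :
    l.foldl (fun acc x => if p x then acc else acc ++ [x]) [] = l.filter (fun x => !p x) := by
  have h := PySem.List.foldl_append_if (fun x => !p x) id l []
  simp only [List.map_id, List.nil_append] at h
  rw [← h]
  congr 1
  funext acc x
  cases hp : p x <;> simp

-- ===== VERDICT (by name: the statement is the Claim_ definition above) =====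
theorem filter_by_exclusion_spec : Claim_equal_filter_by_exclusion := by
  intro articles exc_kw _
  unfold Spec_filter_by_exclusion filter_by_exclusion filter_by_exclusion_alt
  by_cases h : exc_kw = []
  · simp [h]
  · simp only [h, reduceIte]
    rw [foldl_skip_filter]
    congr 1
    funext a
    rw [pvHit_eq]
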